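-- pv_equiv track=rewrite | github.com/olkiewicz/aoc-2020 | 2021/day14/day14.py | get_pair_indexes
-- ===== SOURCE A (Python) =====
-- def get_pair_indexes(_polymer: str, xy: str) -> list:
--     indexes = []
--     i = 0
--
--     while i < len(_polymer):
--         try:
--             index = _polymer[i:].index(xy)
--             indexes.append(index + i)
--             i += index+1
--             continue
--
--         except ValueError:
--             i += 1
--
--     return indexes
-- ===== SOURCE B (Python) =====
-- def get_pair_indexes(_polymer: str, xy: str) -> list:
--     return [i for i in range(len(_polymer)) if _polymer.startswith(xy, i)]
-- ===== Notes on version B (the rewrite author's own statement) =====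
-- stated objective: idiomatic
-- what changed: Replaces A's index-jumping while loop with try/except around str.index on a fresh slice _polymer[i:] each iteration by a single list comprehension testing startswith(xy, i) at every position, with no slicing, jumping or exception handling.
import Mathlib
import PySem

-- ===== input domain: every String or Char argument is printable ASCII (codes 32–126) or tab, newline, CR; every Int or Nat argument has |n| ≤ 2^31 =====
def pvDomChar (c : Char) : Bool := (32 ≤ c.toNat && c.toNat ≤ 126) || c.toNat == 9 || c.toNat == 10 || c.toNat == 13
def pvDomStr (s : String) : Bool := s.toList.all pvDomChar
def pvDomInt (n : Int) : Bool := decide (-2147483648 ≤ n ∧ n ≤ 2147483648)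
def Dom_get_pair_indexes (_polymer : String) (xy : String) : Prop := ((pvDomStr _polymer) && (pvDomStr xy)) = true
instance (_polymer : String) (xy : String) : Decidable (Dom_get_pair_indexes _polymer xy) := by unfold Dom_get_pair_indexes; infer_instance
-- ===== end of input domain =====

-- B replaces A's index-jumping while loop (str.index + try/except) by a per-position
-- startswith comprehension; objective: idiomatic/simpler, same return value, no speed claim.

-- ===== PORT A =====
-- A's while loop: at position i, search xy in _polymer[i:] (PySem.Chars.find = first
-- occurrence, -1 if absent, mirroring .index's ValueError branch), append and jump,
-- or advance by one.  Structural recursion on p.length - i.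
def getPairLoopA (p xy : List Char) (i : Nat) : List Int :=
  if h : i < p.length then
    let f := PySem.Chars.find (p.drop i) xy
    if hf : f = -1 then
      getPairLoopA p xy (i + 1)
    else
      ((i : Int) + f) :: getPairLoopA p xy (i + f.toNat + 1)
  else
    []
termination_by p.length - i
decreasing_by
  · omega
  · omega

def get_pair_indexes (_polymer : String) (xy : String) : List Int :=
  getPairLoopA _polymer.toList xy.toList 0

-- ===== PORT B =====
-- Source B: [i for i in range(len(_polymer)) if _polymer.startswith(xy, i)]
def get_pair_indexes_alt (_polymer : String) (xy : String) : List Int :=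
  ((List.range _polymer.toList.length).filter
      (fun i => PySem.Chars.startswith (_polymer.toList.drop i) xy.toList)).map
    (fun i => Int.ofNat i)

-- ===== PRECONDITION & SPEC =====
def Spec_get_pair_indexes (_polymer : String) (xy : String) (out : List Int) : Prop := out = get_pair_indexes_alt _polymer xy
instance (_polymer : String) (xy : String) (out : List Int) : Decidable (Spec_get_pair_indexes _polymer xy out) := by unfold Spec_get_pair_indexes; infer_instance

-- ===== CLAIM (what is proved, stated in full; the proofs are below) =====
def Claim_equal_get_pair_indexes : Prop := ∀ (_polymer : String) (xy : String), Dom_get_pair_indexes _polymer xy → Spec_get_pair_indexes _polymer xy (get_pair_indexes _polymer xy)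

-- ===== LEMMAS AND PROOFS =====

lemma getPairLoopA_eq (p xy : List Char) (i : Nat) :
    getPairLoopA p xy i =
      ((List.range' i (p.length - i)).filter
          (fun k => PySem.Chars.startswith (p.drop k) xy)).map (fun k => Int.ofNat k) := by
  generalize hn : p.length - i = n
  induction n using Nat.strong_induction_on generalizing i with
  | _ n ih =>
    rw [getPairLoopA]
    by_cases h : i < p.length
    · rw [dif_pos h]
      by_cases hf : PySem.Chars.find (p.drop i) xy = -1
      · -- no occurrence of xy in p.drop i: in particular not a prefix at position i
        rw [dif_pos hf]
        have hni : ¬ xy <+: p.drop i := fun hp =>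
          ((PySem.Chars.find_eq_neg_one_iff _ _).mp hf) hp.isInfix
        have hn1 : n = (p.length - (i+1)) + 1 := by omega
        rw [hn1, List.range'_succ]
        rw [List.filter_cons_of_neg (by simpa [PySem.Chars.startswith_iff])]
        exact ih (p.length - (i+1)) (by omega) (i+1) rfl
      · rw [dif_neg hf]
        have hnn : 0 ≤ PySem.Chars.find (p.drop i) xy := by
          have := PySem.Chars.neg_one_le_find (p.drop i) xy; omega
        obtain ⟨hpre, hmin⟩ := PySem.Chars.find_spec hnn
        set j := (PySem.Chars.find (p.drop i) xy).toNat with hj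
        have hfj : PySem.Chars.find (p.drop i) xy = (j : Int) := (Int.toNat_of_nonneg hnn).symm
        have hdd : ∀ k, (p.drop i).drop k = p.drop (i + k) := fun k => List.drop_drop
        have hij : i + j < p.length := by
          by_cases hxy : xy = []
          · have : j = 0 := by simp [hj, hxy, PySem.Chars.find_nil]
            omega
          · have hne : p.drop (i + j) ≠ [] := fun he => by
              rw [hdd j, he] at hpre
              exact hxy (List.prefix_nil.mp hpre)
            have := List.drop_eq_nil_iff.not.mp hne
            omega
        -- split the index range at the found occurrence
        have hsplit : n = (j + 1) + (p.length - (i + j + 1)) := by omega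
        have happ : List.range' i ((j+1) + (p.length - (i + j + 1))) =
            List.range' i (j+1) ++ List.range' (i + (j+1)) (p.length - (i + j + 1)) := by
          rw [← List.range'_append]; simp
        rw [hsplit, happ, List.filter_append, List.map_append]
        -- the first chunk filters to exactly [i+j]
        have hchunk : (List.range' i (j+1)).filter
            (fun k => PySem.Chars.startswith (p.drop k) xy) = [i + j] := by
          rw [List.range'_concat, List.filter_append]
          have h1 : (List.range' i j).filter
              (fun k => PySem.Chars.startswith (p.drop k) xy) = [] := by
            rw [List.filter_eq_nil_iff]
            intro k hk
            have hkm := List.mem_range'_1.mp hk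
            have : ¬ xy <+: p.drop k := by
              have := hmin (k - i) (by omega)
              rwa [hdd (k - i), Nat.add_sub_cancel' hkm.1] at this
            simpa [PySem.Chars.startswith_iff]
          have h2 : PySem.Chars.startswith (p.drop (i + j)) xy = true := by
            rw [PySem.Chars.startswith_iff]
            rwa [hdd j] at hpre
          simp [h1, h2]
        rw [hchunk]
        have hrec := ih (p.length - (i + j + 1)) (by omega) (i + j + 1) rfl
        simp only [List.map_cons, List.map_nil]
        rw [show i + (j+1) = i + j + 1 by omega, hrec]
        rw [List.singleton_append]
        congr 1
        rw [hfj, Int.ofNat_eq_natCast]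
        push_cast
        ring
    · rw [dif_neg h]
      have : n = 0 := by omega
      simp [this]

theorem get_pair_indexes_spec' (_polymer xy : String) :
    get_pair_indexes _polymer xy = get_pair_indexes_alt _polymer xy := by
  unfold get_pair_indexes get_pair_indexes_alt
  rw [getPairLoopA_eq]
  simp [List.range_eq_range']

-- ===== VERDICT (by name: the statement is the Claim_ definition above) =====
theorem get_pair_indexes_spec : Claim_equal_get_pair_indexes := by
  intro p xy _
  exact get_pair_indexes_spec' p xy
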